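-- pv_equiv track=rewrite | github.com/Aditya8821/Leetcode | Robots - GFG/robots.py | moveRobots
-- ===== SOURCE A (Python) =====
-- def moveRobots (s1, s2):
--     # code here
--     if len(s1)!=len(s2):
--         return "No"
--     bots=[]
--     for i in range(len(s1)):
--         if s1[i]=="A" or s1[i]=="B":
--             bots.append(i)
--     b=0
--     for j in range(len(s2)):
--         if s2[j] == "A" or s2[j]=="B":
--             if b==len(bots) or s1[bots[b]]!=s2[j] or \
--             (s2[j]=="A" and j>bots[b]) or \
--             (s2[j]=="B" and j<bots[b]):
--                 return "No"
--             b+=1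
--     return "Yes" if b==len(bots) else "No"
-- ===== SOURCE B (Python) =====
-- def moveRobots(s1, s2):
--     # Counting criterion: s1 transforms into s2 iff lengths match, the robot
--     # sequences (non-'.' letters A/B in order) are identical, and in every
--     # prefix s2 has at least as many A's (A moves left) and at most as many
--     # B's (B moves right) as s1.
--     if len(s1) != len(s2):
--         return "No"
--     if [c for c in s1 if c == "A" or c == "B"] != [c for c in s2 if c == "A" or c == "B"]:
--         return "No"
--     a1 = b1 = a2 = b2 = 0
--     for x, y in zip(s1, s2):
--         if x == "A":
--             a1 += 1
--         elif x == "B":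
--             b1 += 1
--         if y == "A":
--             a2 += 1
--         elif y == "B":
--             b2 += 1
--         if a2 < a1 or b2 > b1:
--             return "No"
--     return "Yes"
-- ===== Notes on version B (the rewrite author's own statement) =====
-- stated objective: alternative
-- what changed: Replaces A's position-matching algorithm (collect robot indices of s1, walk s2 with a pointer and per-robot position comparisons) by a counting criterion: the robot letter sequences must be equal and every prefix of s2 must contain at least as many A's and at most as many B's as the same prefix of s1, checked with four running counters over zip(s1, s2).
import Mathlib
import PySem

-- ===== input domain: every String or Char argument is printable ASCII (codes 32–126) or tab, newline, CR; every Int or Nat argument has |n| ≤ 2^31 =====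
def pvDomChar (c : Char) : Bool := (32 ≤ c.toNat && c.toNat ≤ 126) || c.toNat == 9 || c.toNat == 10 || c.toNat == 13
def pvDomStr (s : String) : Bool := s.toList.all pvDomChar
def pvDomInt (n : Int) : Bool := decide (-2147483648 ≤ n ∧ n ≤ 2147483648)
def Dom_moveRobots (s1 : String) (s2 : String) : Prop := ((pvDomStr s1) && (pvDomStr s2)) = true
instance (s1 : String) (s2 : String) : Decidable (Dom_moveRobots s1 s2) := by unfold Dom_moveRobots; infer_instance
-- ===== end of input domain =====

-- B replaces A's position-matching (collect robot indices of s1, walk s2 with a pointer)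
-- by a counting criterion: the robot letter sequences must be identical and every prefix
-- of s2 must have at least as many A's and at most as many B's as the same prefix of s1.

-- ===== PORT A =====
-- first loop of A: the indices of 'A'/'B' characters of s1 (bots), in order
def pvBotsA : List Char → Int → List Int
  | [], _ => []
  | c :: rest, i =>
      if c == 'A' || c == 'B' then i :: pvBotsA rest (i + 1) else pvBotsA rest (i + 1)

-- second loop of A: scan s2 with index j; the pointer b into bots becomes consuming
-- the remaining suffix of bots (b == len(bots) ↔ the suffix is empty)
def pvLoopA (s1 : String) : List Char → Int → List Int → String
  | [], _, rem => if rem.isEmpty then "Yes" else "No"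
  | c :: rest, j, rem =>
      if c == 'A' || c == 'B' then
        match rem with
        | [] => "No"
        | p :: rem' =>
            if !(PySem.Str.pyGet? s1 p == some c) || (c == 'A' && decide (j > p))
               || (c == 'B' && decide (j < p)) then "No"
            else pvLoopA s1 rest (j + 1) rem'
      else pvLoopA s1 rest (j + 1) rem

def moveRobots (s1 : String) (s2 : String) : String :=
  if PySem.Str.len s1 ≠ PySem.Str.len s2 then "No"
  else pvLoopA s1 s2.toList 0 (pvBotsA s1.toList 0)

-- ===== PORT B =====
-- 'if x == "A": a += 1 elif x == "B": b += 1' on one counter pair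
def pvStepB (c : Char) (a : Int) (b : Int) : Int × Int :=
  if c == 'A' then (a + 1, b) else if c == 'B' then (a, b + 1) else (a, b)

-- the 'for x, y in zip(s1, s2)' loop with the four prefix counters
def pvLoopB : List (Char × Char) → Int → Int → Int → Int → String
  | [], _, _, _, _ => "Yes"
  | xy :: rest, a1, b1, a2, b2 =>
      let p1 := pvStepB xy.1 a1 b1
      let p2 := pvStepB xy.2 a2 b2
      if p2.1 < p1.1 || p1.2 < p2.2 then "No"
      else pvLoopB rest p1.1 p1.2 p2.1 p2.2

def moveRobots_alt (s1 : String) (s2 : String) : String :=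
  if PySem.Str.len s1 ≠ PySem.Str.len s2 then "No"
  else if s1.toList.filter (fun c => c == 'A' || c == 'B')
         ≠ s2.toList.filter (fun c => c == 'A' || c == 'B') then "No"
  else pvLoopB (s1.toList.zip s2.toList) 0 0 0 0

-- ===== PRECONDITION & SPEC =====
def Spec_moveRobots (s1 : String) (s2 : String) (out : String) : Prop := out = moveRobots_alt s1 s2
instance (s1 : String) (s2 : String) (out : String) : Decidable (Spec_moveRobots s1 s2 out) := by unfold Spec_moveRobots; infer_instance

-- ===== CLAIM (what is proved, stated in full; the proofs are below) =====
def Claim_equal_moveRobots : Prop := ∀ (s1 : String) (s2 : String), Dom_moveRobots s1 s2 → Spec_moveRobots s1 s2 (moveRobots s1 s2)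

-- ===== LEMMAS AND PROOFS =====

-- robots of a string: its 'A'/'B' characters paired with their positions, in order
def pvRobotsR : List Char → Int → List (Char × Int)
  | [], _ => []
  | c :: rest, i =>
      if c == 'A' || c == 'B' then (c, i) :: pvRobotsR rest (i + 1) else pvRobotsR rest (i + 1)

-- the per-pair condition A's scan enforces
def pvCheck (cp : (Char × Int) × (Char × Int)) : Bool :=
  cp.1.1 == cp.2.1 &&
    (if cp.1.1 == 'A' then decide (cp.2.2 ≤ cp.1.2) else decide (cp.1.2 ≤ cp.2.2))

-- number of occurrences of c in l
def pvCnt (c : Char) (l : List Char) : Nat := (l.filter (· == c)).length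

-- number of robots of r with letter c strictly left of position t
def pvCntR (c : Char) (t : Int) (r : List (Char × Int)) : Nat :=
  (r.filter (fun cp => cp.1 == c && decide (cp.2 < t))).length

lemma pvBotsA_eq_map_snd (l : List Char) (i : Int) :
    pvBotsA l i = (pvRobotsR l i).map Prod.snd := by
  induction l generalizing i with
  | nil => simp [pvBotsA, pvRobotsR]
  | cons c rest ih =>
      by_cases h : (c == 'A' || c == 'B') = true
      · simp [pvBotsA, pvRobotsR, h, ih]
      · simp [pvBotsA, pvRobotsR, h, ih]

lemma pvRobotsR_lookup (l : List Char) (i : Int) :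
    ∀ cp ∈ pvRobotsR l i, ∃ k : Nat, cp.2 = i + k ∧ l[k]? = some cp.1 := by
  induction l generalizing i with
  | nil => simp [pvRobotsR]
  | cons c rest ih =>
      intro cp hcp
      by_cases h : (c == 'A' || c == 'B') = true
      · rw [pvRobotsR, if_pos h] at hcp
        rcases List.mem_cons.mp hcp with h1 | h1
        · exact ⟨0, by simp [h1]⟩
        · obtain ⟨k, hk1, hk2⟩ := ih (i + 1) cp h1
          exact ⟨k + 1, by push_cast; omega, by simpa using hk2⟩
      · rw [pvRobotsR, if_neg h] at hcp
        obtain ⟨k, hk1, hk2⟩ := ih (i + 1) cp hcp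
        exact ⟨k + 1, by push_cast; omega, by simpa using hk2⟩

-- A's scan loop equals the length-then-zip pairwise check
lemma pvLoopA_eq_check (s1 : String) :
    ∀ (l2 : List Char) (j : Int) (pr : List (Char × Int)),
      (∀ cp ∈ pr, PySem.Str.pyGet? s1 cp.2 = some cp.1) →
      pvLoopA s1 l2 j (pr.map Prod.snd) =
        (if pr.length ≠ (pvRobotsR l2 j).length then "No"
         else if (pr.zip (pvRobotsR l2 j)).all pvCheck then "Yes" else "No") := by
  intro l2
  induction l2 with
  | nil =>
      intro j pr _
      cases pr with
      | nil => simp [pvLoopA, pvRobotsR]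
      | cons a tl => simp [pvLoopA, pvRobotsR]
  | cons c rest ih =>
      intro j pr hpr
      by_cases hc : (c == 'A' || c == 'B') = true
      · cases pr with
        | nil =>
            simp [pvLoopA, pvRobotsR, hc]
        | cons hd tl =>
            obtain ⟨c1, p⟩ := hd
            have hlook : PySem.List.pyGet? s1.toList p = some c1 := by
              simpa using hpr (c1, p) (List.mem_cons_self ..)
            have htl : ∀ cp ∈ tl, PySem.Str.pyGet? s1 cp.2 = some cp.1 :=
              fun cp h => hpr cp (List.mem_cons_of_mem _ h)
            rw [pvRobotsR, if_pos hc]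
            show pvLoopA s1 (c :: rest) j (p :: tl.map Prod.snd) = _
            rw [pvLoopA, if_pos hc]
            by_cases hc1 : c1 = c
            · subst hc1
              rcases Bool.or_eq_true_iff.mp hc with hA | hB
              · have hA' : c1 = 'A' := by simpa using hA
                subst hA'
                by_cases hj : j > p
                · rw [if_pos (by simp [hlook]; omega)]
                  have hch : pvCheck (('A', p), ('A', j)) = false := by
                    simp [pvCheck]; omega
                  simp only [List.zip_cons_cons, List.all_cons, hch, Bool.false_and]
                  split_ifs <;> simp_all
                · rw [if_neg (by simp [hlook, hj])]
                  rw [ih (j + 1) tl htl]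
                  have hch : pvCheck (('A', p), ('A', j)) = true := by
                    simp [pvCheck]; omega
                  simp only [List.zip_cons_cons, List.all_cons, hch, Bool.true_and]
                  by_cases hL : tl.length = (pvRobotsR rest (j + 1)).length
                  · simp [hL]
                  · simp [hL]
              · have hB' : c1 = 'B' := by simpa using hB
                subst hB'
                by_cases hj : j < p
                · rw [if_pos (by simp [hlook]; omega)]
                  have hch : pvCheck (('B', p), ('B', j)) = false := by
                    simp [pvCheck]; omega
                  simp only [List.zip_cons_cons, List.all_cons, hch, Bool.false_and]
                  split_ifs <;> simp_all
                · rw [if_neg (by simp [hlook, hj])]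
                  rw [ih (j + 1) tl htl]
                  have hch : pvCheck (('B', p), ('B', j)) = true := by
                    simp [pvCheck]; omega
                  simp only [List.zip_cons_cons, List.all_cons, hch, Bool.true_and]
                  by_cases hL : tl.length = (pvRobotsR rest (j + 1)).length
                  · simp [hL]
                  · simp [hL]
            · rw [if_pos (by simp [hlook, hc1])]
              have hch : pvCheck ((c1, p), (c, j)) = false := by
                simp [pvCheck, hc1]
              simp only [List.zip_cons_cons, List.all_cons, hch, Bool.false_and]
              split_ifs <;> simp_all
      · rw [pvRobotsR, if_neg hc]
        cases pr with
        | nil =>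
            have h0 := ih (j + 1) ([] : List (Char × Int)) (by simp)
            simpa [pvLoopA, hc] using h0
        | cons hd tl =>
            obtain ⟨c1, p⟩ := hd
            show pvLoopA s1 (c :: rest) j (p :: tl.map Prod.snd) = _
            rw [pvLoopA, if_neg hc]
            simpa using ih (j + 1) ((c1, p) :: tl) hpr

-- chars of the robots list = the filtered string
lemma pvRobotsR_map_fst (l : List Char) (i : Int) :
    (pvRobotsR l i).map Prod.fst = l.filter (fun c => c == 'A' || c == 'B') := by
  induction l generalizing i with
  | nil => simp [pvRobotsR]
  | cons c rest ih =>
      by_cases h : (c == 'A' || c == 'B') = true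
      · simp [pvRobotsR, h, ih]
      · simp [pvRobotsR, h, ih]

-- positions are at least the offset
lemma pvRobotsR_pos_le (l : List Char) (i : Int) :
    ∀ cp ∈ pvRobotsR l i, i ≤ cp.2 := by
  induction l generalizing i with
  | nil => simp [pvRobotsR]
  | cons c rest ih =>
      intro cp hcp
      by_cases h : (c == 'A' || c == 'B') = true
      · rw [pvRobotsR, if_pos h] at hcp
        rcases List.mem_cons.mp hcp with h1 | h1
        · simp [h1]
        · have := ih (i + 1) cp h1; omega
      · rw [pvRobotsR, if_neg h] at hcp
        have := ih (i + 1) cp hcp; omega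

-- positions are below offset + length
lemma pvRobotsR_pos_lt (l : List Char) (i : Int) :
    ∀ cp ∈ pvRobotsR l i, cp.2 < i + l.length := by
  induction l generalizing i with
  | nil => simp [pvRobotsR]
  | cons c rest ih =>
      intro cp hcp
      by_cases h : (c == 'A' || c == 'B') = true
      · rw [pvRobotsR, if_pos h] at hcp
        rcases List.mem_cons.mp hcp with h1 | h1
        · rw [h1]; simp only [List.length_cons]; push_cast; omega
        · have := ih (i + 1) cp h1
          simp only [List.length_cons] at ⊢
          push_cast at this ⊢; omega
      · rw [pvRobotsR, if_neg h] at hcp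
        have := ih (i + 1) cp hcp
        simp only [List.length_cons] at ⊢
        push_cast at this ⊢; omega

-- positions strictly increase along the list
lemma pvRobotsR_pairwise (l : List Char) (i : Int) :
    (pvRobotsR l i).Pairwise (fun a b => a.2 < b.2) := by
  induction l generalizing i with
  | nil => simp [pvRobotsR]
  | cons c rest ih =>
      by_cases h : (c == 'A' || c == 'B') = true
      · rw [pvRobotsR, if_pos h]
        exact List.Pairwise.cons
          (fun cp hcp => by have := pvRobotsR_pos_le rest (i + 1) cp hcp; omega)
          (ih (i + 1))
      · rw [pvRobotsR, if_neg h]; exact ih (i + 1)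

-- counting letters in a prefix = counting robots left of the cut
lemma pvCnt_take_eq (c : Char) (hc : c = 'A' ∨ c = 'B') (l : List Char) (i : Int) (u : Nat) :
    pvCnt c (l.take u) = pvCntR c (i + u) (pvRobotsR l i) := by
  induction l generalizing i u with
  | nil => simp [pvCnt, pvCntR, pvRobotsR]
  | cons x rest ih =>
      cases u with
      | zero =>
          simp only [List.take_zero, Nat.cast_zero, add_zero]
          have hnil : List.filter (fun cp => cp.1 == c && decide (cp.2 < i))
              (pvRobotsR (x :: rest) i) = [] := by
            refine List.filter_eq_nil_iff.mpr (fun cp h => ?_)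
            have := pvRobotsR_pos_le (x :: rest) i cp h
            simp; omega
          simp [pvCnt, pvCntR, hnil]
      | succ v =>
          have hiv : i + ((v : Int) + 1) = (i + 1) + (v : Int) := by omega
          by_cases h : (x == 'A' || x == 'B') = true
          · rw [pvRobotsR, if_pos h]
            simp only [List.take_succ_cons, pvCnt, pvCntR, List.filter_cons]
            push_cast
            rw [hiv]
            have ihv := ih (i + 1) v
            simp only [pvCnt, pvCntR] at ihv
            have hlt : i < i + 1 + (v : Int) := by omega
            by_cases hxc : (x == c) = true
            · simp [hxc, hlt, ihv]
            · simp [hxc, ihv]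
          · rw [pvRobotsR, if_neg h]
            have hxc : (x == c) = false := by
              rcases hc with rfl | rfl <;> simp_all
            simp only [List.take_succ_cons, pvCnt, pvCntR, List.filter_cons, hxc]
            push_cast
            rw [hiv]
            have ihv := ih (i + 1) v
            simp only [pvCnt, pvCntR] at ihv
            simpa using ihv

-- counting in a singleton / cons
def pvCnt1 (c : Char) (x : Char) : Nat := if x == c then 1 else 0

lemma pvCnt_nil (c : Char) : pvCnt c [] = 0 := rfl

lemma pvCnt_cons (c : Char) (x : Char) (l : List Char) :
    pvCnt c (x :: l) = pvCnt1 c x + pvCnt c l := by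
  simp only [pvCnt, pvCnt1, List.filter_cons]
  split <;> simp [Nat.add_comm]

lemma pvStepB_eq (c : Char) (a : Int) (b : Int) :
    pvStepB c a b = (a + (pvCnt1 'A' c : Int), b + (pvCnt1 'B' c : Int)) := by
  by_cases h1 : c = 'A'
  · subst h1; simp [pvStepB, pvCnt1]
  · by_cases h2 : c = 'B'
    · subst h2; simp [pvStepB, pvCnt1]
    · simp [pvStepB, pvCnt1, h1, h2]

-- the counter loop says yes iff every nonempty prefix satisfies the two count bounds
lemma pvLoopB_yes_iff (z : List (Char × Char)) :
    ∀ (a1 b1 a2 b2 : Int),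
      (pvLoopB z a1 b1 a2 b2 = "Yes" ↔
        ∀ u : Nat, 1 ≤ u → u ≤ z.length →
          (a1 + (pvCnt 'A' ((z.take u).map Prod.fst) : Int) ≤ a2 + (pvCnt 'A' ((z.take u).map Prod.snd) : Int))
          ∧ (b2 + (pvCnt 'B' ((z.take u).map Prod.snd) : Int) ≤ b1 + (pvCnt 'B' ((z.take u).map Prod.fst) : Int))) := by
  induction z with
  | nil =>
      intro a1 b1 a2 b2
      constructor
      · intro _ u hu1 hu2; simp at hu2; omega
      · intro _; rfl
  | cons xy rest ih =>
      intro a1 b1 a2 b2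
      simp only [pvLoopB, pvStepB_eq]
      split_ifs with hg
      · constructor
        · intro h; exact absurd h (by simp)
        · intro h
          have h1 := h 1 (by omega) (by simp)
          simp only [List.take_succ_cons, List.take_zero, List.map_cons, List.map_nil,
            pvCnt_cons, pvCnt_nil] at h1
          exfalso
          rcases Bool.or_eq_true_iff.mp hg with hx | hx <;> simp at hx <;> omega
      · simp only [Bool.or_eq_true, decide_eq_true_eq, not_or, Int.not_lt] at hg
        rw [ih]
        constructor
        · intro h u hu1 hu2
          cases u with
          | zero => omega
          | succ v =>
              simp only [List.take_succ_cons, List.map_cons, pvCnt_cons, Nat.cast_add]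
              rcases Nat.eq_zero_or_pos v with rfl | hv
              · simp only [List.take_zero, List.map_nil, pvCnt_nil]
                omega
              · have hv2 : v ≤ rest.length := by
                  simp only [List.length_cons] at hu2; omega
                have := h v hv hv2
                omega
        · intro h v hv1 hv2
          have := h (v + 1) (by omega) (by simp only [List.length_cons]; omega)
          simp only [List.take_succ_cons, List.map_cons, pvCnt_cons, Nat.cast_add] at this
          omega

lemma pvLoopB_yes_or_no (z : List (Char × Char)) :
    ∀ (a1 b1 a2 b2 : Int), pvLoopB z a1 b1 a2 b2 = "Yes" ∨ pvLoopB z a1 b1 a2 b2 = "No" := by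
  induction z with
  | nil => intro a1 b1 a2 b2; left; rfl
  | cons xy rest ih =>
      intro a1 b1 a2 b2
      simp only [pvLoopB]
      split_ifs
      · right; rfl
      · exact ih _ _ _ _

-- pairwise check plus equal length forces equal letter sequences
lemma pvAll_check_map_fst (r1 : List (Char × Int)) :
    ∀ r2 : List (Char × Int), r1.length = r2.length →
      (r1.zip r2).all pvCheck = true → r1.map Prod.fst = r2.map Prod.fst := by
  induction r1 with
  | nil =>
      intro r2 hlen _
      cases r2 with
      | nil => rfl
      | cons b tl => simp at hlen
  | cons a tl ih =>
      intro r2 hlen hall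
      cases r2 with
      | nil => simp at hlen
      | cons b tl2 =>
          simp only [List.zip_cons_cons, List.all_cons, Bool.and_eq_true] at hall
          have hfst : a.1 = b.1 := by
            have := hall.1
            unfold pvCheck at this
            simp only [Bool.and_eq_true, beq_iff_eq] at this
            exact this.1
          simp only [List.map_cons, hfst]
          rw [ih tl2 (by simpa using hlen) hall.2]

-- zip-pointwise implication bounds filter lengths
lemma pvFilter_le_of_zip {α : Type} (P Q : α → Bool) :
    ∀ (r1 r2 : List α), r1.length = r2.length →
      (∀ p ∈ r1.zip r2, P p.1 = true → Q p.2 = true) →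
      (r1.filter P).length ≤ (r2.filter Q).length := by
  intro r1
  induction r1 with
  | nil => intro r2 _ _; simp
  | cons a tl ih =>
      intro r2 hlen himp
      cases r2 with
      | nil => simp at hlen
      | cons b tl2 =>
          have hrec := ih tl2 (by simpa using hlen)
            (fun p hp => himp p (by simp [List.zip_cons_cons, hp]))
          simp only [List.filter_cons]
          by_cases hPa : P a = true
          · have hQb : Q b = true := himp (a, b) (by simp [List.zip_cons_cons]) hPa
            rw [if_pos hPa, if_pos hQb]
            simp only [List.length_cons]
            omega
          · rw [if_neg hPa]
            by_cases hQb : Q b = true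
            · rw [if_pos hQb]; simp only [List.length_cons]; omega
            · rw [if_neg hQb]; omega

-- symmetric variant: bound the second list's filter by the first's
lemma pvFilter_ge_of_zip {α : Type} (P Q : α → Bool) :
    ∀ (r1 r2 : List α), r1.length = r2.length →
      (∀ p ∈ r1.zip r2, Q p.2 = true → P p.1 = true) →
      (r2.filter Q).length ≤ (r1.filter P).length := by
  intro r1
  induction r1 with
  | nil =>
      intro r2 hlen _
      cases r2 with
      | nil => simp
      | cons b tl => simp at hlen
  | cons a tl ih =>
      intro r2 hlen himp
      cases r2 with
      | nil => simp at hlen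
      | cons b tl2 =>
          have hrec := ih tl2 (by simpa using hlen)
            (fun p hp => himp p (by simp [List.zip_cons_cons, hp]))
          simp only [List.filter_cons]
          by_cases hQb : Q b = true
          · have hPa : P a = true := himp (a, b) (by simp [List.zip_cons_cons]) hQb
            rw [if_pos hPa, if_pos hQb]
            simp only [List.length_cons]
            omega
          · rw [if_neg hQb]
            by_cases hPa : P a = true
            · rw [if_pos hPa]; simp only [List.length_cons]; omega
            · rw [if_neg hPa]; omega

-- equal fst sequences give equal counts for any fst-predicate
lemma pvFilter_fst_len_eq {P : Char → Bool} (r1 r2 : List (Char × Int))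
    (h : r1.map Prod.fst = r2.map Prod.fst) :
    (r1.filter (fun cp => P cp.1)).length = (r2.filter (fun cp => P cp.1)).length := by
  induction r1 generalizing r2 with
  | nil =>
      cases r2 with
      | nil => rfl
      | cons b tl => simp at h
  | cons a tl ih =>
      cases r2 with
      | nil => simp at h
      | cons b tl2 =>
          simp only [List.map_cons, List.cons.injEq] at h
          simp only [List.filter_cons, h.1]
          split <;> simp [ih tl2 h.2]

-- easy direction: the pairwise position conditions imply all count bounds
lemma pvCheck_to_counts (r1 r2 : List (Char × Int))
    (hlen : r1.length = r2.length)
    (hall : (r1.zip r2).all pvCheck = true) (t : Int) :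
    pvCntR 'A' t r1 ≤ pvCntR 'A' t r2 ∧ pvCntR 'B' t r2 ≤ pvCntR 'B' t r1 := by
  have hmem : ∀ p ∈ r1.zip r2, pvCheck p = true := by
    intro p hp; exact List.all_eq_true.mp hall p hp
  constructor
  · refine pvFilter_le_of_zip _ _ r1 r2 hlen (fun p hp hP => ?_)
    have hch := hmem p hp
    unfold pvCheck at hch
    simp only [Bool.and_eq_true, beq_iff_eq, decide_eq_true_eq] at hch hP ⊢
    obtain ⟨hfst, hcond⟩ := hch
    refine ⟨hfst ▸ hP.1, ?_⟩
    rw [hP.1] at hcond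
    simp at hcond
    omega
  · refine pvFilter_ge_of_zip _ _ r1 r2 hlen (fun p hp hQ => ?_)
    have hch := hmem p hp
    unfold pvCheck at hch
    simp only [Bool.and_eq_true, beq_iff_eq, decide_eq_true_eq] at hch hQ ⊢
    obtain ⟨hfst, hcond⟩ := hch
    have hB1 : p.1.1 = 'B' := hfst.trans hQ.1
    rw [hB1] at hcond
    simp at hcond
    exact ⟨hB1, by omega⟩

-- dropping the position conjunct from the filter can only grow the count
lemma pvFilter_and_le (c : Char) (t : Int) (l : List (Char × Int)) :
    (l.filter (fun cp => cp.1 == c && decide (cp.2 < t))).length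
      ≤ (l.filter (fun cp => cp.1 == c)).length := by
  induction l with
  | nil => simp
  | cons a tl ih =>
      simp only [List.filter_cons]
      by_cases hp : (a.1 == c) = true
      · by_cases hq : (decide (a.2 < t)) = true
        · rw [if_pos (by simp [hp, hq]), if_pos hp]
          simp only [List.length_cons]
          omega
        · rw [if_neg (by simp [hq]), if_pos hp]
          simp only [List.length_cons]
          omega
      · rw [if_neg (by simp [hp]), if_neg hp]
        exact ih

-- a robot strictly out of place makes the count strictly drop at the cut just right of it
lemma pvCntR_lt (c : Char) (r1 r2 : List (Char × Int))
    (hfst : r1.map Prod.fst = r2.map Prod.fst)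
    (hm1 : r1.Pairwise (fun a b => a.2 < b.2))
    (hm2 : r2.Pairwise (fun a b => a.2 < b.2))
    (k : Nat) (hk1 : k < r1.length) (hk2 : k < r2.length)
    (hc : (r1[k]).1 = c)
    (hlt : (r1[k]).2 < (r2[k]).2) :
    pvCntR c ((r1[k]).2 + 1) r2 < pvCntR c ((r1[k]).2 + 1) r1 := by
  set t : Int := (r1[k]).2 + 1 with ht
  -- the r2 side: robots at index ≥ k sit at position ≥ r2[k].2 > r1[k].2, outside the cut
  have hdrop2 : (r2.drop k).filter (fun cp => cp.1 == c && decide (cp.2 < t)) = [] := by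
    refine List.filter_eq_nil_iff.mpr (fun cp hcp => ?_)
    rw [List.mem_drop_iff_getElem] at hcp
    obtain ⟨j, hj, rfl⟩ := hcp
    have hge : (r2[k]).2 ≤ (r2[k + j]).2 := by
      rcases Nat.eq_zero_or_pos j with rfl | hjpos
      · simp
      · exact le_of_lt (List.pairwise_iff_getElem.mp hm2 k (k + j) hk2 (by omega) (by omega))
    simp only [Bool.and_eq_true, decide_eq_true_eq, not_and]
    intro _
    omega
  have hcnt2 : pvCntR c t r2 ≤ ((r2.take k).filter (fun cp => cp.1 == c)).length := by
    unfold pvCntR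
    conv_lhs => rw [← List.take_append_drop k r2]
    rw [List.filter_append, hdrop2, List.length_append, List.length_nil]
    have := pvFilter_and_le c t (r2.take k)
    omega
  -- the r1 side: the first k+1 robots all sit at position ≤ r1[k].2, inside the cut
  have htake1 : ∀ cp ∈ r1.take (k + 1), cp.2 < t := by
    intro cp hcp
    rw [List.mem_take_iff_getElem] at hcp
    obtain ⟨j, hj, rfl⟩ := hcp
    rcases Nat.lt_or_ge j k with hjk | hjk
    · have := List.pairwise_iff_getElem.mp hm1 j k (by omega) hk1 hjk
      omega
    · have : j = k := by omega
      subst this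
      omega
  have hcong : (r1.take (k + 1)).filter (fun cp => cp.1 == c && decide (cp.2 < t))
      = (r1.take (k + 1)).filter (fun cp => cp.1 == c) := by
    refine List.filter_congr (fun cp hcp => ?_)
    simp [htake1 cp hcp]
  have htk : r1.take (k + 1) = r1.take k ++ [r1[k]] := by
    rw [List.take_add_one]; simp [List.getElem?_eq_getElem hk1]
  have hcnt1 : ((r1.take k).filter (fun cp => cp.1 == c)).length + 1 ≤ pvCntR c t r1 := by
    unfold pvCntR
    conv_rhs => rw [← List.take_append_drop (k + 1) r1]
    rw [List.filter_append, List.length_append, hcong, htk, List.filter_append]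
    have hx : List.filter (fun cp => cp.1 == c) [r1[k]] = [r1[k]] := by
      simp [hc]
    rw [hx, List.length_append]
    simp
  -- the counts over the first k robots agree, their letters being equal
  have hXeq : ((r1.take k).filter (fun cp => cp.1 == c)).length
      = ((r2.take k).filter (fun cp => cp.1 == c)).length := by
    have hmt : (r1.take k).map Prod.fst = (r2.take k).map Prod.fst := by
      rw [List.map_take, List.map_take, hfst]
    exact pvFilter_fst_len_eq (P := fun x => x == c) (r1.take k) (r2.take k) hmt
  omega

-- hard direction: a failing pair yields a prefix where a count bound fails
lemma pvCounts_to_check (r1 r2 : List (Char × Int))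
    (hfst : r1.map Prod.fst = r2.map Prod.fst)
    (hm1 : r1.Pairwise (fun a b => a.2 < b.2))
    (hm2 : r2.Pairwise (fun a b => a.2 < b.2))
    (hab : ∀ cp ∈ r1, cp.1 = 'A' ∨ cp.1 = 'B')
    (hzero1 : ∀ cp ∈ r1, 0 ≤ cp.2) (hzero2 : ∀ cp ∈ r2, 0 ≤ cp.2)
    (n : Nat) (hub1 : ∀ cp ∈ r1, cp.2 < (n : Int)) (hub2 : ∀ cp ∈ r2, cp.2 < (n : Int))
    (hno : (r1.zip r2).all pvCheck = false) :
    ∃ u : Nat, 1 ≤ u ∧ u ≤ n ∧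
      ¬(pvCntR 'A' (u : Int) r1 ≤ pvCntR 'A' (u : Int) r2
        ∧ pvCntR 'B' (u : Int) r2 ≤ pvCntR 'B' (u : Int) r1) := by
  have hlen : r1.length = r2.length := by
    have := congrArg List.length hfst
    simpa using this
  obtain ⟨p, hp, hchkT⟩ := List.all_eq_false.mp hno
  obtain ⟨k, hkz, hke⟩ := List.mem_iff_getElem.mp hp
  have hk1 : k < r1.length := by rw [List.length_zip] at hkz; omega
  have hk2 : k < r2.length := by rw [List.length_zip] at hkz; omega
  have hfstk : (r2[k]).1 = (r1[k]).1 := by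
    have h1 : (r1.map Prod.fst)[k]'(by simpa using hk1) = (r2.map Prod.fst)[k]'(by simpa using hk2) := by
      simp only [hfst]
    simp only [List.getElem_map] at h1
    exact h1.symm
  have hchk' : pvCheck (r1[k], r2[k]) = false := by
    have h := hchkT
    rw [← hke, List.getElem_zip] at h
    simpa using h
  unfold pvCheck at hchk'
  simp only [hfstk, beq_self_eq_true, Bool.true_and] at hchk'
  rcases hab (r1[k]) (List.getElem_mem hk1) with hA | hB
  · -- an 'A' robot moved right: the cut just right of its s1 position fails the A-bound
    rw [hA] at hchk'
    simp only [beq_self_eq_true, if_true, decide_eq_false_iff_not, Int.not_le] at hchk'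
    have h0 : (0 : Int) ≤ (r1[k]).2 := hzero1 _ (List.getElem_mem hk1)
    have hn : (r1[k]).2 < (n : Int) := hub1 _ (List.getElem_mem hk1)
    refine ⟨((r1[k]).2 + 1).toNat, by omega, by omega, ?_⟩
    have hcast : ((((r1[k]).2 + 1).toNat : Nat) : Int) = (r1[k]).2 + 1 := by omega
    rw [hcast]
    have := pvCntR_lt 'A' r1 r2 hfst hm1 hm2 k hk1 hk2 hA hchk'
    omega
  · -- a 'B' robot moved left: the cut just right of its s2 position fails the B-bound
    rw [hB] at hchk'
    simp only [if_neg (by decide : ¬(('B' == 'A') = true)), decide_eq_false_iff_not,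
      Int.not_le] at hchk'
    have hBk : (r2[k]).1 = 'B' := hfstk.trans hB
    have h0 : (0 : Int) ≤ (r2[k]).2 := hzero2 _ (List.getElem_mem hk2)
    have hn : (r2[k]).2 < (n : Int) := hub2 _ (List.getElem_mem hk2)
    refine ⟨((r2[k]).2 + 1).toNat, by omega, by omega, ?_⟩
    have hcast : ((((r2[k]).2 + 1).toNat : Nat) : Int) = (r2[k]).2 + 1 := by omega
    rw [hcast]
    have := pvCntR_lt 'B' r2 r1 hfst.symm hm2 hm1 k hk2 hk1 hBk hchk'
    omega

-- ===== VERDICT (by name: the statement is the Claim_ definition above) =====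
theorem moveRobots_spec : Claim_equal_moveRobots := by
  intro s1 s2 _
  unfold Spec_moveRobots moveRobots moveRobots_alt
  by_cases hlen : PySem.Str.len s1 ≠ PySem.Str.len s2
  · rw [if_pos hlen, if_pos hlen]
  · rw [if_neg hlen, if_neg hlen]
    have hl : s1.toList.length = s2.toList.length := by
      have h2 := not_ne_iff.mp hlen
      simp [PySem.Str.len_eq] at h2
      exact h2
    have hook : ∀ cp ∈ pvRobotsR s1.toList 0, PySem.Str.pyGet? s1 cp.2 = some cp.1 := by
      intro cp hcp
      obtain ⟨k, hk1, hk2⟩ := pvRobotsR_lookup s1.toList 0 cp hcp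
      rw [hk1]
      simpa using hk2
    rw [pvBotsA_eq_map_snd, pvLoopA_eq_check s1 s2.toList 0 (pvRobotsR s1.toList 0) hook]
    set l1 := s1.toList with hl1
    set l2 := s2.toList with hl2
    set r1 := pvRobotsR l1 0 with hr1
    set r2 := pvRobotsR l2 0 with hr2
    by_cases hf : l1.filter (fun c => c == 'A' || c == 'B')
        = l2.filter (fun c => c == 'A' || c == 'B')
    · have hfst : r1.map Prod.fst = r2.map Prod.fst := by
        rw [hr1, hr2, pvRobotsR_map_fst, pvRobotsR_map_fst]
        exact hf
      have hrlen : r1.length = r2.length := by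
        have := congrArg List.length hfst
        simpa using this
      rw [if_neg (not_not_intro hf), if_neg (not_not_intro hrlen)]
      -- the two count translations used in both directions
      have hzlen : (l1.zip l2).length = l1.length := by
        rw [List.length_zip]; omega
      have hbA1 : ∀ u : Nat, pvCnt 'A' (((l1.zip l2).take u).map Prod.fst) = pvCntR 'A' (u : Int) r1 := by
        intro u
        rw [List.map_take, List.map_fst_zip (le_of_eq hl)]
        have := pvCnt_take_eq 'A' (Or.inl rfl) l1 0 u
        simpa using this
      have hbB1 : ∀ u : Nat, pvCnt 'B' (((l1.zip l2).take u).map Prod.fst) = pvCntR 'B' (u : Int) r1 := by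
        intro u
        rw [List.map_take, List.map_fst_zip (le_of_eq hl)]
        have := pvCnt_take_eq 'B' (Or.inr rfl) l1 0 u
        simpa using this
      have hbA2 : ∀ u : Nat, pvCnt 'A' (((l1.zip l2).take u).map Prod.snd) = pvCntR 'A' (u : Int) r2 := by
        intro u
        rw [List.map_take, List.map_snd_zip (ge_of_eq hl)]
        have := pvCnt_take_eq 'A' (Or.inl rfl) l2 0 u
        simpa using this
      have hbB2 : ∀ u : Nat, pvCnt 'B' (((l1.zip l2).take u).map Prod.snd) = pvCntR 'B' (u : Int) r2 := by
        intro u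
        rw [List.map_take, List.map_snd_zip (ge_of_eq hl)]
        have := pvCnt_take_eq 'B' (Or.inr rfl) l2 0 u
        simpa using this
      cases hAll : (r1.zip r2).all pvCheck with
      | true =>
          rw [if_pos (rfl : (true : Bool) = true)]
          have hyes : pvLoopB (l1.zip l2) 0 0 0 0 = "Yes" := by
            rw [pvLoopB_yes_iff]
            intro u _ _
            have hc := pvCheck_to_counts r1 r2 hrlen hAll (u : Int)
            rw [hbA1 u, hbA2 u, hbB1 u, hbB2 u]
            omega
          rw [hyes]
      | false =>
          rw [if_neg (by simp : ¬((false : Bool) = true))]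
          have hab : ∀ cp ∈ r1, cp.1 = 'A' ∨ cp.1 = 'B' := by
            intro cp h
            have hm : cp.1 ∈ r1.map Prod.fst := List.mem_map_of_mem h
            rw [hr1, pvRobotsR_map_fst] at hm
            have := List.of_mem_filter hm
            simpa using this
          have hz1 : ∀ cp ∈ r1, (0 : Int) ≤ cp.2 := pvRobotsR_pos_le l1 0
          have hz2 : ∀ cp ∈ r2, (0 : Int) ≤ cp.2 := pvRobotsR_pos_le l2 0
          have hu1 : ∀ cp ∈ r1, cp.2 < (l1.length : Int) := by
            intro cp h
            have := pvRobotsR_pos_lt l1 0 cp h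
            omega
          have hu2 : ∀ cp ∈ r2, cp.2 < (l1.length : Int) := by
            intro cp h
            have := pvRobotsR_pos_lt l2 0 cp h
            rw [hl]
            omega
          obtain ⟨u, huge, hule, hviol⟩ :=
            pvCounts_to_check r1 r2 hfst (pvRobotsR_pairwise l1 0) (pvRobotsR_pairwise l2 0)
              hab hz1 hz2 l1.length hu1 hu2 hAll
          rcases pvLoopB_yes_or_no (l1.zip l2) 0 0 0 0 with hyes | hno
          · exfalso
            have hc := (pvLoopB_yes_iff (l1.zip l2) 0 0 0 0).mp hyes u huge (by omega)
            rw [hbA1 u, hbA2 u, hbB1 u, hbB2 u] at hc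
            exact hviol ⟨by omega, by omega⟩
          · rw [hno]
    · rw [if_pos hf]
      by_cases hrlen : r1.length = r2.length
      · have hne : ¬((r1.zip r2).all pvCheck = true) := by
          intro hall
          exact hf (by
            rw [← pvRobotsR_map_fst l1 0, ← pvRobotsR_map_fst l2 0]
            exact pvAll_check_map_fst r1 r2 hrlen hall)
        rw [if_neg (not_not_intro hrlen), if_neg hne]
      · rw [if_pos hrlen]
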